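-- pv_equiv track=rewrite | github.com/jwekavanagh/project-nod | python/src/agentskeptic/kernel/outcome_certificate.py | _rollup_checkpoint_group_verdict
-- ===== SOURCE A (Python) =====
-- from typing import Any, Literal
--
-- def _rollup_checkpoint_group_verdict(outcomes: list[dict[str, Any]]) -> str:
--     if any(o.get("status") == "incomplete_verification" for o in outcomes):
--         return "incomplete"
--     if any(o.get("status") in ("missing", "inconsistent", "partially_verified") for o in outcomes):
--         return "inconsistent"
--     if all(o.get("status") == "verified" for o in outcomes):
--         return "verified"
--     return "incomplete"
-- ===== SOURCE B (Python) =====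
-- _RANK = {
--     "incomplete_verification": 3,
--     "missing": 2,
--     "inconsistent": 2,
--     "partially_verified": 2,
--     "verified": 0,
-- }
-- _VERDICT = ("verified", "incomplete", "inconsistent", "incomplete")
--
-- def _rollup_checkpoint_group_verdict(outcomes):
--     sev = max((_RANK.get(o.get("status"), 1) for o in outcomes), default=0)
--     return _VERDICT[sev]
-- ===== Notes on version B (the rewrite author's own statement) =====
-- stated objective: alternative
-- what changed: Replaced the prioritized any/any/all boolean scans by a severity-lattice reduction: each status is mapped to a numeric rank (verified=0, unknown=1, inconsistent-family=2, incomplete_verification=3), the verdict is read off from the maximum rank via a lookup table.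
import Mathlib
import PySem

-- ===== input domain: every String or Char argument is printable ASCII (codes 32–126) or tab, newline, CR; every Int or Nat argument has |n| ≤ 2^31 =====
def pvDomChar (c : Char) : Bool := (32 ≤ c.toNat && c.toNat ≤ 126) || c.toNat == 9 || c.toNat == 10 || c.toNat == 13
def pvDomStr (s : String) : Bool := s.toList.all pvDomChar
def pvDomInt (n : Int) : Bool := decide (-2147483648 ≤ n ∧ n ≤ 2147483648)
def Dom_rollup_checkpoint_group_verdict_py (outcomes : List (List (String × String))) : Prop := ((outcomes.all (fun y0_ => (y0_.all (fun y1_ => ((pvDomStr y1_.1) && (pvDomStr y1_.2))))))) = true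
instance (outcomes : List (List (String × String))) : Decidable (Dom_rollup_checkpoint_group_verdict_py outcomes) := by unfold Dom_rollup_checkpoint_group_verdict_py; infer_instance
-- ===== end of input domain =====

-- B replaces A's prioritized any/any/all scans by a severity-lattice max-reduction with a verdict table (objective: alternative).

-- ===== PORT A =====
-- o.get("status") on the association list
def pvStatus (o : List (String × String)) : Option String :=
  (PySem.Dict.mk o).get? "status"

def rollup_checkpoint_group_verdict_py (outcomes : List (List (String × String))) : String :=
  if outcomes.any (fun o => pvStatus o == some "incomplete_verification") then "incomplete"
  else if outcomes.any (fun o =>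
      pvStatus o == some "missing" || pvStatus o == some "inconsistent" ||
      pvStatus o == some "partially_verified") then "inconsistent"
  else if outcomes.all (fun o => pvStatus o == some "verified") then "verified"
  else "incomplete"

-- ===== PORT B =====
-- _RANK.get(key, 1): lookup in the literal rank table with default 1 (key may be None)
def pvRank (s : Option String) : Nat :=
  if s == some "incomplete_verification" then 3
  else if s == some "missing" then 2
  else if s == some "inconsistent" then 2
  else if s == some "partially_verified" then 2
  else if s == some "verified" then 0
  else 1

-- _VERDICT[sev]
def pvVerdictTable (sev : Nat) : String :=
  match sev with
  | 0 => "verified"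
  | 1 => "incomplete"
  | 2 => "inconsistent"
  | _ => "incomplete"

def rollup_checkpoint_group_verdict_py_alt (outcomes : List (List (String × String))) : String :=
  let sev := outcomes.foldl (fun m o => max m (pvRank (pvStatus o))) 0
  pvVerdictTable sev

-- ===== PRECONDITION & SPEC =====
def Spec_rollup_checkpoint_group_verdict_py (outcomes : List (List (String × String))) (out : String) : Prop := out = rollup_checkpoint_group_verdict_py_alt outcomes
instance (outcomes : List (List (String × String))) (out : String) : Decidable (Spec_rollup_checkpoint_group_verdict_py outcomes out) := by unfold Spec_rollup_checkpoint_group_verdict_py; infer_instance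

-- ===== CLAIM (what is proved, stated in full; the proofs are below) =====
def Claim_equal_rollup_checkpoint_group_verdict_py : Prop := ∀ (outcomes : List (List (String × String))), Dom_rollup_checkpoint_group_verdict_py outcomes → Spec_rollup_checkpoint_group_verdict_py outcomes (rollup_checkpoint_group_verdict_py outcomes)

-- ===== LEMMAS AND PROOFS =====

def pvSev (outcomes : List (List (String × String))) : Nat :=
  outcomes.foldl (fun m o => max m (pvRank (pvStatus o))) 0

theorem pvRank_le (s : Option String) : pvRank s ≤ 3 := by
  unfold pvRank; split_ifs <;> omega

theorem pvSev_acc (xs : List (List (String × String))) (m : Nat) :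
    xs.foldl (fun m o => max m (pvRank (pvStatus o))) m = max m (pvSev xs) := by
  induction xs generalizing m with
  | nil => simp [pvSev]
  | cons x xs ih =>
    simp only [pvSev, List.foldl_cons, Nat.zero_max] at *
    rw [ih, ih (pvRank (pvStatus x))]
    omega

theorem pvSev_cons (x : List (String × String)) (xs : List (List (String × String))) :
    pvSev (x :: xs) = max (pvRank (pvStatus x)) (pvSev xs) := by
  simp only [pvSev, List.foldl_cons, Nat.zero_max]
  exact pvSev_acc xs _

theorem pvSev_le (xs : List (List (String × String))) : pvSev xs ≤ 3 := by
  induction xs with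
  | nil => simp [pvSev]
  | cons x xs ih => rw [pvSev_cons]; have := pvRank_le (pvStatus x); omega

-- rank pointwise characterisations
theorem pvRank_eq_three (s : Option String) :
    (s == some "incomplete_verification") = decide (pvRank s = 3) := by
  unfold pvRank; split_ifs <;> simp_all

theorem pvRank_eq_two (s : Option String) :
    (s == some "missing" || s == some "inconsistent" || s == some "partially_verified")
      = decide (pvRank s = 2) := by
  unfold pvRank; split_ifs <;> simp_all

theorem pvRank_eq_zero (s : Option String) :
    (s == some "verified") = decide (pvRank s = 0) := by
  unfold pvRank; split_ifs <;> simp_all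

-- max-reduction characterisations of A's three scans
theorem any_three (xs : List (List (String × String))) :
    xs.any (fun o => pvStatus o == some "incomplete_verification") = decide (pvSev xs = 3) := by
  induction xs with
  | nil => simp [pvSev]
  | cons x xs ih =>
    rw [List.any_cons, ih, pvSev_cons, pvRank_eq_three]
    have h1 := pvRank_le (pvStatus x)
    have h2 := pvSev_le xs
    by_cases hx : pvRank (pvStatus x) = 3 <;> by_cases hs : pvSev xs = 3 <;>
      simp [hx, hs] <;> omega

theorem any_two (xs : List (List (String × String)))
    (h : xs.any (fun o => pvStatus o == some "incomplete_verification") = false) :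
    xs.any (fun o =>
      pvStatus o == some "missing" || pvStatus o == some "inconsistent" ||
      pvStatus o == some "partially_verified") = decide (pvSev xs = 2) := by
  induction xs with
  | nil => simp [pvSev]
  | cons x xs ih =>
    rw [List.any_cons] at h
    have hx3 : pvRank (pvStatus x) ≠ 3 := by
      have := pvRank_eq_three (pvStatus x)
      simp only [Bool.or_eq_false_iff] at h
      rw [this] at h
      simpa using h.1
    have hs3 : pvSev xs ≤ 2 := by
      have := pvSev_le xs
      have h3 := any_three xs
      simp only [Bool.or_eq_false_iff] at h
      rw [h3] at h
      have := h.2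
      simp at this
      omega
    rw [List.any_cons, ih (by simp only [Bool.or_eq_false_iff] at h; exact h.2),
        pvSev_cons, pvRank_eq_two]
    have h1 := pvRank_le (pvStatus x)
    by_cases hx : pvRank (pvStatus x) = 2 <;> by_cases hs : pvSev xs = 2 <;>
      simp [hx, hs] <;> omega

theorem all_zero (xs : List (List (String × String))) :
    xs.all (fun o => pvStatus o == some "verified") = decide (pvSev xs = 0) := by
  induction xs with
  | nil => simp [pvSev]
  | cons x xs ih =>
    rw [List.all_cons, ih, pvSev_cons, pvRank_eq_zero]
    by_cases hx : pvRank (pvStatus x) = 0 <;> by_cases hs : pvSev xs = 0 <;>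
      simp [hx, hs]

-- ===== VERDICT (by name: the statement is the Claim_ definition above) =====
theorem rollup_checkpoint_group_verdict_py_spec : Claim_equal_rollup_checkpoint_group_verdict_py := by
  intro outcomes _
  unfold Spec_rollup_checkpoint_group_verdict_py
  unfold rollup_checkpoint_group_verdict_py rollup_checkpoint_group_verdict_py_alt
  show _ = pvVerdictTable (pvSev outcomes)
  rw [any_three, all_zero]
  have hle := pvSev_le outcomes
  by_cases h3 : pvSev outcomes = 3
  · simp [h3, pvVerdictTable]
  · rw [if_neg (by simp [h3])]
    rw [any_two outcomes (by rw [any_three]; simp [h3])]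
    by_cases h2 : pvSev outcomes = 2
    · simp [h2, pvVerdictTable]
    · rw [if_neg (by simp [h2])]
      by_cases h0 : pvSev outcomes = 0
      · simp [h0, pvVerdictTable]
      · have h1 : pvSev outcomes = 1 := by omega
        simp [h1, pvVerdictTable]
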